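-- pv_equiv track=rewrite | github.com/JebunNmoni/Advanced-Algorithms | Strings/RotationalCipher.py | rotationalCipherSlow
-- ===== SOURCE A (Python) =====
-- import string
--
-- def rotationalCipherSlow(input, rotation_factor):
--   # Write your code here
--     asciiNum = [ord(f'{x}')  for x in range(10)]
--     asciiLower = [ord(x) for x in string.ascii_lowercase]
--     asciiUpper = [ord(x) for x in string.ascii_uppercase]
--
--     input = list(input)
--
--     for x in range(len(input)):
--         chNum = ord(input[x])
--         if chNum in asciiNum:
--             newAscii = min(asciiNum) + (asciiNum.index(chNum) + rotation_factor) % len(asciiNum)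
--             input[x] = chr(newAscii)
--         elif chNum in asciiLower:
--             newAscii = min(asciiLower) + (asciiLower.index(chNum) + rotation_factor) % len(asciiLower)
--             input[x] = chr(newAscii)
--         elif chNum in asciiUpper:
--             newAscii = min(asciiUpper) + (asciiUpper.index(chNum) + rotation_factor) % len(asciiUpper)
--             input[x] = chr(newAscii)
--     return ''.join(input)
-- ===== SOURCE B (Python) =====
-- import string
--
-- def rotationalCipherSlow(input, rotation_factor):
--     table = {}
--     for group in (string.digits, string.ascii_lowercase, string.ascii_uppercase):
--         base = ord(group[0])
--         n = len(group)
--         for i, ch in enumerate(group):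
--             table[ch] = chr(base + (i + rotation_factor) % n)
--     return ''.join(table.get(ch, ch) for ch in input)
-- ===== Notes on version B (the rewrite author's own statement) =====
-- stated objective: faster
-- what changed: B precomputes one rotation table (dict over the 62 digit/lower/upper characters) and applies it uniformly with table.get(ch, ch) in a single pass, instead of A's per-character membership tests plus min() and list.index() scans over three ord-lists.
import Mathlib
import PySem

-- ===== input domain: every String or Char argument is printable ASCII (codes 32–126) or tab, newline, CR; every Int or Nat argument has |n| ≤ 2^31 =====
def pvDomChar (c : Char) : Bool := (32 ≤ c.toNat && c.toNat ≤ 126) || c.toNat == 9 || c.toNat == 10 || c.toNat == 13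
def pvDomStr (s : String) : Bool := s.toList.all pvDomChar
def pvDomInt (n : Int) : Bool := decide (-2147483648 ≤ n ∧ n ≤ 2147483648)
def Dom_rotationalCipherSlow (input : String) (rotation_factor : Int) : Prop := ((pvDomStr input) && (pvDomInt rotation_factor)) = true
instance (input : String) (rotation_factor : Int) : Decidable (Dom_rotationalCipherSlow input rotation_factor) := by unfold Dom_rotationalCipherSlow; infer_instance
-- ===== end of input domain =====

-- B replaces A's per-character membership/index/min scans over three ord-lists by one
-- precomputed rotation table (dict) applied uniformly in a single pass (objective: faster; measured).

-- ===== PORT A =====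
-- ord(f'{x}') for x in range(10): str(x) is a single character; ord is that character's code (exact here).
def rcOrdOfDigitStr (x : Int) : Int := (((PySem.Int.toStr x).toList.headD '0').toNat : Int)

def rcAsciiNum : List Int := (PySem.List.pyRange 0 10 1).map rcOrdOfDigitStr
def rcAsciiLower : List Int := "abcdefghijklmnopqrstuvwxyz".toList.map (fun c => (c.toNat : Int))
def rcAsciiUpper : List Int := "ABCDEFGHIJKLMNOPQRSTUVWXYZ".toList.map (fun c => (c.toNat : Int))

-- body of A's for-loop: each iteration rewrites input[x] from input[x] only, so the loop is this map
def rcStepA (rotation_factor : Int) (c : Char) : Char :=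
  let chNum : Int := (c.toNat : Int)
  if chNum ∈ rcAsciiNum then
    let newAscii : Int := ((PySem.List.min? rcAsciiNum (fun y => y)).getD 0)
      + PySem.Int.mod ((((PySem.List.index? rcAsciiNum chNum).getD 0 : Nat) : Int) + rotation_factor) (rcAsciiNum.length : Int)
    Char.ofNat newAscii.toNat
  else if chNum ∈ rcAsciiLower then
    let newAscii : Int := ((PySem.List.min? rcAsciiLower (fun y => y)).getD 0)
      + PySem.Int.mod ((((PySem.List.index? rcAsciiLower chNum).getD 0 : Nat) : Int) + rotation_factor) (rcAsciiLower.length : Int)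
    Char.ofNat newAscii.toNat
  else if chNum ∈ rcAsciiUpper then
    let newAscii : Int := ((PySem.List.min? rcAsciiUpper (fun y => y)).getD 0)
      + PySem.Int.mod ((((PySem.List.index? rcAsciiUpper chNum).getD 0 : Nat) : Int) + rotation_factor) (rcAsciiUpper.length : Int)
    Char.ofNat newAscii.toNat
  else c

def rotationalCipherSlow (input : String) (rotation_factor : Int) : String :=
  String.mk ((input.toList).map (rcStepA rotation_factor))

-- ===== PORT B =====
def rcGroups : List (List Char) :=
  ["0123456789".toList, "abcdefghijklmnopqrstuvwxyz".toList, "ABCDEFGHIJKLMNOPQRSTUVWXYZ".toList]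

def rcTable (rotation_factor : Int) : PySem.Dict Char Char :=
  rcGroups.foldl
    (fun d group =>
      let base : Int := ((group.headD ' ').toNat : Int)
      let n : Int := (group.length : Int)
      (PySem.List.enumerate group).foldl
        (fun d p => PySem.Dict.insert d p.2 (Char.ofNat (base + PySem.Int.mod (p.1 + rotation_factor) n).toNat)) d)
    PySem.Dict.empty

def rotationalCipherSlow_alt (input : String) (rotation_factor : Int) : String :=
  let table := rcTable rotation_factor
  String.mk ((input.toList).map (fun ch => PySem.Dict.getD table ch ch))

-- ===== PRECONDITION & SPEC =====
def Spec_rotationalCipherSlow (input : String) (rotation_factor : Int) (out : String) : Prop := out = rotationalCipherSlow_alt input rotation_factor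
instance (input : String) (rotation_factor : Int) (out : String) : Decidable (Spec_rotationalCipherSlow input rotation_factor out) := by unfold Spec_rotationalCipherSlow; infer_instance

-- ===== CLAIM (what is proved, stated in full; the proofs are below) =====
def Claim_equal_rotationalCipherSlow : Prop := ∀ (input : String) (rotation_factor : Int), Dom_rotationalCipherSlow input rotation_factor → Spec_rotationalCipherSlow input rotation_factor (rotationalCipherSlow input rotation_factor)

-- ===== LEMMAS AND PROOFS =====

lemma rc_char_toNat_inj {a b : Char} (h : a.toNat = b.toNat) : a = b :=
  Char.ext (UInt32.toNat_inj.mp h)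

lemma rc_hnum : rcAsciiNum = [48,49,50,51,52,53,54,55,56,57] := by decide
lemma rc_hlow : rcAsciiLower = [97,98,99,100,101,102,103,104,105,106,107,108,109,110,111,112,113,114,115,116,117,118,119,120,121,122] := by decide
lemma rc_hup : rcAsciiUpper = [65,66,67,68,69,70,71,72,73,74,75,76,77,78,79,80,81,82,83,84,85,86,87,88,89,90] := by decide

lemma rc_ins_notmem (f : Int × Char → Char) (l : List (Int × Char)) (d : PySem.Dict Char Char)
    (c : Char) (h : c ∉ l.map Prod.snd) :
    (l.foldl (fun d p => d.insert p.2 (f p)) d).getD c c = d.getD c c := by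
  induction l generalizing d with
  | nil => rfl
  | cons p t ih =>
    simp only [List.map_cons, List.mem_cons, not_or] at h
    rw [List.foldl_cons, ih _ (by tauto), PySem.Dict.getD_insert_of_ne _ _ _ h.1]

lemma rc_ins_mem (f : Int × Char → Char) (l : List (Int × Char)) (d : PySem.Dict Char Char)
    (c : Char) (i : Int) (h : (i, c) ∈ l) (hnd : (l.map Prod.snd).Nodup) :
    (l.foldl (fun d p => d.insert p.2 (f p)) d).getD c c = f (i, c) := by
  induction l generalizing d with
  | nil => simp at h
  | cons p t ih =>
    simp only [List.map_cons, List.nodup_cons] at hnd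
    rcases List.mem_cons.mp h with rfl | ht
    · rw [List.foldl_cons, rc_ins_notmem _ _ _ _ (by simpa using hnd.1),
        PySem.Dict.getD_insert_self]
    · rw [List.foldl_cons]; exact ih _ ht hnd.2

lemma rc_tbl (rf : Int) : rcTable rf =
    (PySem.List.enumerate "ABCDEFGHIJKLMNOPQRSTUVWXYZ".toList).foldl
      (fun d p => d.insert p.2 (Char.ofNat (((("ABCDEFGHIJKLMNOPQRSTUVWXYZ".toList.headD ' ').toNat : Int)) + PySem.Int.mod (p.1 + rf) (("ABCDEFGHIJKLMNOPQRSTUVWXYZ".toList.length : Nat) : Int)).toNat))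
      ((PySem.List.enumerate "abcdefghijklmnopqrstuvwxyz".toList).foldl
        (fun d p => d.insert p.2 (Char.ofNat (((("abcdefghijklmnopqrstuvwxyz".toList.headD ' ').toNat : Int)) + PySem.Int.mod (p.1 + rf) (("abcdefghijklmnopqrstuvwxyz".toList.length : Nat) : Int)).toNat))
        ((PySem.List.enumerate "0123456789".toList).foldl
          (fun d p => d.insert p.2 (Char.ofNat (((("0123456789".toList.headD ' ').toNat : Int)) + PySem.Int.mod (p.1 + rf) (("0123456789".toList.length : Nat) : Int)).toNat))
          PySem.Dict.empty)) := by
  simp only [rcTable, rcGroups, List.foldl]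

lemma rc_perchar_dig (rf : Int) (k : Nat) (hk : k < 10) :
    rcStepA rf (Char.ofNat (48+k)) =
      PySem.Dict.getD (rcTable rf) (Char.ofNat (48+k)) (Char.ofNat (48+k)) := by
  have hto : (Char.ofNat (48+k)).toNat = 48 + k := by interval_cases k <;> decide
  rw [rc_tbl, rc_ins_notmem _ _ _ _ (by interval_cases k <;> decide),
      rc_ins_notmem _ _ _ _ (by interval_cases k <;> decide),
      rc_ins_mem _ _ _ _ ((k:Int)) (by interval_cases k <;> decide) (by decide)]
  simp only [rcStepA, hto]
  rw [if_pos (by rw [rc_hnum]; simp; omega)]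
  rw [show PySem.List.min? rcAsciiNum (fun y => y) = some 48 from by decide,
      show PySem.List.index? rcAsciiNum (((48 + k : Nat) : Int)) = some k from by interval_cases k <;> decide,
      show ((rcAsciiNum.length : Nat) : Int) = 10 from by decide,
      show (("0123456789".toList.headD ' ').toNat : Int) = 48 from by decide,
      show (("0123456789".toList.length : Nat) : Int) = 10 from by decide]
  simp

lemma rc_perchar_low (rf : Int) (k : Nat) (hk : k < 26) :
    rcStepA rf (Char.ofNat (97+k)) =
      PySem.Dict.getD (rcTable rf) (Char.ofNat (97+k)) (Char.ofNat (97+k)) := by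
  have hto : (Char.ofNat (97+k)).toNat = 97 + k := by interval_cases k <;> decide
  rw [rc_tbl, rc_ins_notmem _ _ _ _ (by interval_cases k <;> decide),
      rc_ins_mem _ _ _ _ ((k:Int)) (by interval_cases k <;> decide) (by decide)]
  simp only [rcStepA, hto]
  rw [if_neg (by rw [rc_hnum]; simp; omega)]
  rw [if_pos (by rw [rc_hlow]; simp; omega)]
  rw [show PySem.List.min? rcAsciiLower (fun y => y) = some 97 from by decide,
      show PySem.List.index? rcAsciiLower (((97 + k : Nat) : Int)) = some k from by interval_cases k <;> decide,
      show ((rcAsciiLower.length : Nat) : Int) = 26 from by decide,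
      show (("abcdefghijklmnopqrstuvwxyz".toList.headD ' ').toNat : Int) = 97 from by decide,
      show (("abcdefghijklmnopqrstuvwxyz".toList.length : Nat) : Int) = 26 from by decide]
  simp

lemma rc_perchar_up (rf : Int) (k : Nat) (hk : k < 26) :
    rcStepA rf (Char.ofNat (65+k)) =
      PySem.Dict.getD (rcTable rf) (Char.ofNat (65+k)) (Char.ofNat (65+k)) := by
  have hto : (Char.ofNat (65+k)).toNat = 65 + k := by interval_cases k <;> decide
  rw [rc_tbl, rc_ins_mem _ _ _ _ ((k:Int)) (by interval_cases k <;> decide) (by decide)]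
  simp only [rcStepA, hto]
  rw [if_neg (by rw [rc_hnum]; simp; omega)]
  rw [if_neg (by rw [rc_hlow]; simp; omega)]
  rw [if_pos (by rw [rc_hup]; simp; omega)]
  rw [show PySem.List.min? rcAsciiUpper (fun y => y) = some 65 from by decide,
      show PySem.List.index? rcAsciiUpper (((65 + k : Nat) : Int)) = some k from by interval_cases k <;> decide,
      show ((rcAsciiUpper.length : Nat) : Int) = 26 from by decide,
      show (("ABCDEFGHIJKLMNOPQRSTUVWXYZ".toList.headD ' ').toNat : Int) = 65 from by decide,
      show (("ABCDEFGHIJKLMNOPQRSTUVWXYZ".toList.length : Nat) : Int) = 26 from by decide]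
  simp

lemma rc_perchar (rf : Int) (c : Char) :
    rcStepA rf c = PySem.Dict.getD (rcTable rf) c c := by
  by_cases h1 : c ∈ "0123456789".toList
  case pos =>
    obtain ⟨k, hk, rfl⟩ : ∃ k < 10, c = Char.ofNat (48+k) := by
      simp only [show "0123456789".toList = ['0','1','2','3','4','5','6','7','8','9'] from rfl,
        List.mem_cons, List.not_mem_nil, or_false] at h1
      rcases h1 with rfl|rfl|rfl|rfl|rfl|rfl|rfl|rfl|rfl|rfl
      · exact ⟨0, by norm_num, by decide⟩
      · exact ⟨1, by norm_num, by decide⟩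
      · exact ⟨2, by norm_num, by decide⟩
      · exact ⟨3, by norm_num, by decide⟩
      · exact ⟨4, by norm_num, by decide⟩
      · exact ⟨5, by norm_num, by decide⟩
      · exact ⟨6, by norm_num, by decide⟩
      · exact ⟨7, by norm_num, by decide⟩
      · exact ⟨8, by norm_num, by decide⟩
      · exact ⟨9, by norm_num, by decide⟩
    exact rc_perchar_dig rf k hk
  case neg =>
  by_cases h2 : c ∈ "abcdefghijklmnopqrstuvwxyz".toList
  case pos =>
    obtain ⟨k, hk, rfl⟩ : ∃ k < 26, c = Char.ofNat (97+k) := by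
      simp only [show "abcdefghijklmnopqrstuvwxyz".toList = ['a','b','c','d','e','f','g','h','i','j','k','l','m','n','o','p','q','r','s','t','u','v','w','x','y','z'] from rfl,
        List.mem_cons, List.not_mem_nil, or_false] at h2
      rcases h2 with rfl|rfl|rfl|rfl|rfl|rfl|rfl|rfl|rfl|rfl|rfl|rfl|rfl|rfl|rfl|rfl|rfl|rfl|rfl|rfl|rfl|rfl|rfl|rfl|rfl|rfl
      · exact ⟨0, by norm_num, by decide⟩
      · exact ⟨1, by norm_num, by decide⟩
      · exact ⟨2, by norm_num, by decide⟩
      · exact ⟨3, by norm_num, by decide⟩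
      · exact ⟨4, by norm_num, by decide⟩
      · exact ⟨5, by norm_num, by decide⟩
      · exact ⟨6, by norm_num, by decide⟩
      · exact ⟨7, by norm_num, by decide⟩
      · exact ⟨8, by norm_num, by decide⟩
      · exact ⟨9, by norm_num, by decide⟩
      · exact ⟨10, by norm_num, by decide⟩
      · exact ⟨11, by norm_num, by decide⟩
      · exact ⟨12, by norm_num, by decide⟩
      · exact ⟨13, by norm_num, by decide⟩
      · exact ⟨14, by norm_num, by decide⟩
      · exact ⟨15, by norm_num, by decide⟩
      · exact ⟨16, by norm_num, by decide⟩
      · exact ⟨17, by norm_num, by decide⟩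
      · exact ⟨18, by norm_num, by decide⟩
      · exact ⟨19, by norm_num, by decide⟩
      · exact ⟨20, by norm_num, by decide⟩
      · exact ⟨21, by norm_num, by decide⟩
      · exact ⟨22, by norm_num, by decide⟩
      · exact ⟨23, by norm_num, by decide⟩
      · exact ⟨24, by norm_num, by decide⟩
      · exact ⟨25, by norm_num, by decide⟩
    exact rc_perchar_low rf k hk
  case neg =>
  by_cases h3 : c ∈ "ABCDEFGHIJKLMNOPQRSTUVWXYZ".toList
  case pos =>
    obtain ⟨k, hk, rfl⟩ : ∃ k < 26, c = Char.ofNat (65+k) := by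
      simp only [show "ABCDEFGHIJKLMNOPQRSTUVWXYZ".toList = ['A','B','C','D','E','F','G','H','I','J','K','L','M','N','O','P','Q','R','S','T','U','V','W','X','Y','Z'] from rfl,
        List.mem_cons, List.not_mem_nil, or_false] at h3
      rcases h3 with rfl|rfl|rfl|rfl|rfl|rfl|rfl|rfl|rfl|rfl|rfl|rfl|rfl|rfl|rfl|rfl|rfl|rfl|rfl|rfl|rfl|rfl|rfl|rfl|rfl|rfl
      · exact ⟨0, by norm_num, by decide⟩
      · exact ⟨1, by norm_num, by decide⟩
      · exact ⟨2, by norm_num, by decide⟩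
      · exact ⟨3, by norm_num, by decide⟩
      · exact ⟨4, by norm_num, by decide⟩
      · exact ⟨5, by norm_num, by decide⟩
      · exact ⟨6, by norm_num, by decide⟩
      · exact ⟨7, by norm_num, by decide⟩
      · exact ⟨8, by norm_num, by decide⟩
      · exact ⟨9, by norm_num, by decide⟩
      · exact ⟨10, by norm_num, by decide⟩
      · exact ⟨11, by norm_num, by decide⟩
      · exact ⟨12, by norm_num, by decide⟩
      · exact ⟨13, by norm_num, by decide⟩
      · exact ⟨14, by norm_num, by decide⟩
      · exact ⟨15, by norm_num, by decide⟩
      · exact ⟨16, by norm_num, by decide⟩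
      · exact ⟨17, by norm_num, by decide⟩
      · exact ⟨18, by norm_num, by decide⟩
      · exact ⟨19, by norm_num, by decide⟩
      · exact ⟨20, by norm_num, by decide⟩
      · exact ⟨21, by norm_num, by decide⟩
      · exact ⟨22, by norm_num, by decide⟩
      · exact ⟨23, by norm_num, by decide⟩
      · exact ⟨24, by norm_num, by decide⟩
      · exact ⟨25, by norm_num, by decide⟩
    exact rc_perchar_up rf k hk
  case neg =>
    have hn_d1 : ((c.toNat : Int)) ∉ rcAsciiNum := by
      rw [rc_hnum]
      intro hm
      simp only [List.mem_cons, List.not_mem_nil, or_false] at hm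
      rcases hm with he|he|he|he|he|he|he|he|he|he
      · exact h1 (by rw [show c = '0' from rc_char_toNat_inj (by rw [show Char.toNat '0' = 48 from rfl]; exact_mod_cast he)]; decide)
      · exact h1 (by rw [show c = '1' from rc_char_toNat_inj (by rw [show Char.toNat '1' = 49 from rfl]; exact_mod_cast he)]; decide)
      · exact h1 (by rw [show c = '2' from rc_char_toNat_inj (by rw [show Char.toNat '2' = 50 from rfl]; exact_mod_cast he)]; decide)
      · exact h1 (by rw [show c = '3' from rc_char_toNat_inj (by rw [show Char.toNat '3' = 51 from rfl]; exact_mod_cast he)]; decide)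
      · exact h1 (by rw [show c = '4' from rc_char_toNat_inj (by rw [show Char.toNat '4' = 52 from rfl]; exact_mod_cast he)]; decide)
      · exact h1 (by rw [show c = '5' from rc_char_toNat_inj (by rw [show Char.toNat '5' = 53 from rfl]; exact_mod_cast he)]; decide)
      · exact h1 (by rw [show c = '6' from rc_char_toNat_inj (by rw [show Char.toNat '6' = 54 from rfl]; exact_mod_cast he)]; decide)
      · exact h1 (by rw [show c = '7' from rc_char_toNat_inj (by rw [show Char.toNat '7' = 55 from rfl]; exact_mod_cast he)]; decide)
      · exact h1 (by rw [show c = '8' from rc_char_toNat_inj (by rw [show Char.toNat '8' = 56 from rfl]; exact_mod_cast he)]; decide)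
      · exact h1 (by rw [show c = '9' from rc_char_toNat_inj (by rw [show Char.toNat '9' = 57 from rfl]; exact_mod_cast he)]; decide)
    have hn_l2 : ((c.toNat : Int)) ∉ rcAsciiLower := by
      rw [rc_hlow]
      intro hm
      simp only [List.mem_cons, List.not_mem_nil, or_false] at hm
      rcases hm with he|he|he|he|he|he|he|he|he|he|he|he|he|he|he|he|he|he|he|he|he|he|he|he|he|he
      · exact h2 (by rw [show c = 'a' from rc_char_toNat_inj (by rw [show Char.toNat 'a' = 97 from rfl]; exact_mod_cast he)]; decide)
      · exact h2 (by rw [show c = 'b' from rc_char_toNat_inj (by rw [show Char.toNat 'b' = 98 from rfl]; exact_mod_cast he)]; decide)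
      · exact h2 (by rw [show c = 'c' from rc_char_toNat_inj (by rw [show Char.toNat 'c' = 99 from rfl]; exact_mod_cast he)]; decide)
      · exact h2 (by rw [show c = 'd' from rc_char_toNat_inj (by rw [show Char.toNat 'd' = 100 from rfl]; exact_mod_cast he)]; decide)
      · exact h2 (by rw [show c = 'e' from rc_char_toNat_inj (by rw [show Char.toNat 'e' = 101 from rfl]; exact_mod_cast he)]; decide)
      · exact h2 (by rw [show c = 'f' from rc_char_toNat_inj (by rw [show Char.toNat 'f' = 102 from rfl]; exact_mod_cast he)]; decide)
      · exact h2 (by rw [show c = 'g' from rc_char_toNat_inj (by rw [show Char.toNat 'g' = 103 from rfl]; exact_mod_cast he)]; decide)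
      · exact h2 (by rw [show c = 'h' from rc_char_toNat_inj (by rw [show Char.toNat 'h' = 104 from rfl]; exact_mod_cast he)]; decide)
      · exact h2 (by rw [show c = 'i' from rc_char_toNat_inj (by rw [show Char.toNat 'i' = 105 from rfl]; exact_mod_cast he)]; decide)
      · exact h2 (by rw [show c = 'j' from rc_char_toNat_inj (by rw [show Char.toNat 'j' = 106 from rfl]; exact_mod_cast he)]; decide)
      · exact h2 (by rw [show c = 'k' from rc_char_toNat_inj (by rw [show Char.toNat 'k' = 107 from rfl]; exact_mod_cast he)]; decide)
      · exact h2 (by rw [show c = 'l' from rc_char_toNat_inj (by rw [show Char.toNat 'l' = 108 from rfl]; exact_mod_cast he)]; decide)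
      · exact h2 (by rw [show c = 'm' from rc_char_toNat_inj (by rw [show Char.toNat 'm' = 109 from rfl]; exact_mod_cast he)]; decide)
      · exact h2 (by rw [show c = 'n' from rc_char_toNat_inj (by rw [show Char.toNat 'n' = 110 from rfl]; exact_mod_cast he)]; decide)
      · exact h2 (by rw [show c = 'o' from rc_char_toNat_inj (by rw [show Char.toNat 'o' = 111 from rfl]; exact_mod_cast he)]; decide)
      · exact h2 (by rw [show c = 'p' from rc_char_toNat_inj (by rw [show Char.toNat 'p' = 112 from rfl]; exact_mod_cast he)]; decide)
      · exact h2 (by rw [show c = 'q' from rc_char_toNat_inj (by rw [show Char.toNat 'q' = 113 from rfl]; exact_mod_cast he)]; decide)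
      · exact h2 (by rw [show c = 'r' from rc_char_toNat_inj (by rw [show Char.toNat 'r' = 114 from rfl]; exact_mod_cast he)]; decide)
      · exact h2 (by rw [show c = 's' from rc_char_toNat_inj (by rw [show Char.toNat 's' = 115 from rfl]; exact_mod_cast he)]; decide)
      · exact h2 (by rw [show c = 't' from rc_char_toNat_inj (by rw [show Char.toNat 't' = 116 from rfl]; exact_mod_cast he)]; decide)
      · exact h2 (by rw [show c = 'u' from rc_char_toNat_inj (by rw [show Char.toNat 'u' = 117 from rfl]; exact_mod_cast he)]; decide)
      · exact h2 (by rw [show c = 'v' from rc_char_toNat_inj (by rw [show Char.toNat 'v' = 118 from rfl]; exact_mod_cast he)]; decide)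
      · exact h2 (by rw [show c = 'w' from rc_char_toNat_inj (by rw [show Char.toNat 'w' = 119 from rfl]; exact_mod_cast he)]; decide)
      · exact h2 (by rw [show c = 'x' from rc_char_toNat_inj (by rw [show Char.toNat 'x' = 120 from rfl]; exact_mod_cast he)]; decide)
      · exact h2 (by rw [show c = 'y' from rc_char_toNat_inj (by rw [show Char.toNat 'y' = 121 from rfl]; exact_mod_cast he)]; decide)
      · exact h2 (by rw [show c = 'z' from rc_char_toNat_inj (by rw [show Char.toNat 'z' = 122 from rfl]; exact_mod_cast he)]; decide)
    have hn_u3 : ((c.toNat : Int)) ∉ rcAsciiUpper := by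
      rw [rc_hup]
      intro hm
      simp only [List.mem_cons, List.not_mem_nil, or_false] at hm
      rcases hm with he|he|he|he|he|he|he|he|he|he|he|he|he|he|he|he|he|he|he|he|he|he|he|he|he|he
      · exact h3 (by rw [show c = 'A' from rc_char_toNat_inj (by rw [show Char.toNat 'A' = 65 from rfl]; exact_mod_cast he)]; decide)
      · exact h3 (by rw [show c = 'B' from rc_char_toNat_inj (by rw [show Char.toNat 'B' = 66 from rfl]; exact_mod_cast he)]; decide)
      · exact h3 (by rw [show c = 'C' from rc_char_toNat_inj (by rw [show Char.toNat 'C' = 67 from rfl]; exact_mod_cast he)]; decide)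
      · exact h3 (by rw [show c = 'D' from rc_char_toNat_inj (by rw [show Char.toNat 'D' = 68 from rfl]; exact_mod_cast he)]; decide)
      · exact h3 (by rw [show c = 'E' from rc_char_toNat_inj (by rw [show Char.toNat 'E' = 69 from rfl]; exact_mod_cast he)]; decide)
      · exact h3 (by rw [show c = 'F' from rc_char_toNat_inj (by rw [show Char.toNat 'F' = 70 from rfl]; exact_mod_cast he)]; decide)
      · exact h3 (by rw [show c = 'G' from rc_char_toNat_inj (by rw [show Char.toNat 'G' = 71 from rfl]; exact_mod_cast he)]; decide)
      · exact h3 (by rw [show c = 'H' from rc_char_toNat_inj (by rw [show Char.toNat 'H' = 72 from rfl]; exact_mod_cast he)]; decide)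
      · exact h3 (by rw [show c = 'I' from rc_char_toNat_inj (by rw [show Char.toNat 'I' = 73 from rfl]; exact_mod_cast he)]; decide)
      · exact h3 (by rw [show c = 'J' from rc_char_toNat_inj (by rw [show Char.toNat 'J' = 74 from rfl]; exact_mod_cast he)]; decide)
      · exact h3 (by rw [show c = 'K' from rc_char_toNat_inj (by rw [show Char.toNat 'K' = 75 from rfl]; exact_mod_cast he)]; decide)
      · exact h3 (by rw [show c = 'L' from rc_char_toNat_inj (by rw [show Char.toNat 'L' = 76 from rfl]; exact_mod_cast he)]; decide)
      · exact h3 (by rw [show c = 'M' from rc_char_toNat_inj (by rw [show Char.toNat 'M' = 77 from rfl]; exact_mod_cast he)]; decide)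
      · exact h3 (by rw [show c = 'N' from rc_char_toNat_inj (by rw [show Char.toNat 'N' = 78 from rfl]; exact_mod_cast he)]; decide)
      · exact h3 (by rw [show c = 'O' from rc_char_toNat_inj (by rw [show Char.toNat 'O' = 79 from rfl]; exact_mod_cast he)]; decide)
      · exact h3 (by rw [show c = 'P' from rc_char_toNat_inj (by rw [show Char.toNat 'P' = 80 from rfl]; exact_mod_cast he)]; decide)
      · exact h3 (by rw [show c = 'Q' from rc_char_toNat_inj (by rw [show Char.toNat 'Q' = 81 from rfl]; exact_mod_cast he)]; decide)
      · exact h3 (by rw [show c = 'R' from rc_char_toNat_inj (by rw [show Char.toNat 'R' = 82 from rfl]; exact_mod_cast he)]; decide)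
      · exact h3 (by rw [show c = 'S' from rc_char_toNat_inj (by rw [show Char.toNat 'S' = 83 from rfl]; exact_mod_cast he)]; decide)
      · exact h3 (by rw [show c = 'T' from rc_char_toNat_inj (by rw [show Char.toNat 'T' = 84 from rfl]; exact_mod_cast he)]; decide)
      · exact h3 (by rw [show c = 'U' from rc_char_toNat_inj (by rw [show Char.toNat 'U' = 85 from rfl]; exact_mod_cast he)]; decide)
      · exact h3 (by rw [show c = 'V' from rc_char_toNat_inj (by rw [show Char.toNat 'V' = 86 from rfl]; exact_mod_cast he)]; decide)
      · exact h3 (by rw [show c = 'W' from rc_char_toNat_inj (by rw [show Char.toNat 'W' = 87 from rfl]; exact_mod_cast he)]; decide)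
      · exact h3 (by rw [show c = 'X' from rc_char_toNat_inj (by rw [show Char.toNat 'X' = 88 from rfl]; exact_mod_cast he)]; decide)
      · exact h3 (by rw [show c = 'Y' from rc_char_toNat_inj (by rw [show Char.toNat 'Y' = 89 from rfl]; exact_mod_cast he)]; decide)
      · exact h3 (by rw [show c = 'Z' from rc_char_toNat_inj (by rw [show Char.toNat 'Z' = 90 from rfl]; exact_mod_cast he)]; decide)
    rw [rc_tbl,
      rc_ins_notmem _ _ _ _ (by rw [show ((PySem.List.enumerate "ABCDEFGHIJKLMNOPQRSTUVWXYZ".toList).map Prod.snd) = "ABCDEFGHIJKLMNOPQRSTUVWXYZ".toList from PySem.List.map_snd_enumerate _ _]; exact h3),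
      rc_ins_notmem _ _ _ _ (by rw [show ((PySem.List.enumerate "abcdefghijklmnopqrstuvwxyz".toList).map Prod.snd) = "abcdefghijklmnopqrstuvwxyz".toList from PySem.List.map_snd_enumerate _ _]; exact h2),
      rc_ins_notmem _ _ _ _ (by rw [show ((PySem.List.enumerate "0123456789".toList).map Prod.snd) = "0123456789".toList from PySem.List.map_snd_enumerate _ _]; exact h1)]
    simp only [rcStepA, if_neg hn_d1, if_neg hn_l2, if_neg hn_u3]
    rfl

-- ===== VERDICT (by name: the statement is the Claim_ definition above) =====
theorem rotationalCipherSlow_spec : Claim_equal_rotationalCipherSlow := by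
  intro input rf _
  unfold Spec_rotationalCipherSlow rotationalCipherSlow rotationalCipherSlow_alt
  exact congrArg String.mk (List.map_congr_left (fun ch _ => rc_perchar rf ch))
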